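-- pv_equiv track=rewrite | github.com/riqie/Aprendendo | Linguagens de Programação/Python/1. Introdução a Programação/Exercícios/Lista 10/M10L - ex10.py | impar
-- ===== SOURCE A (Python) =====
-- def impar(lst):
--     if lst == []: #Caso a função receba uma lista vazia
--         return False
--     if len(lst) == 1: #Condição para evitar chegar à lista vazia
--         if lst[0] % 2 == 0: #Avaliação do ultimo termo
--             return False
--         return True
--     if lst[0] % 2 == 1: #Análise de cada condição chamando a função novamente
--         return impar(lst[1:])
--     return False
-- ===== SOURCE B (Python) =====
-- def impar(lst):
--     if not lst:
--         return False
--     for x in lst: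
--         if x % 2 != 1:
--             return False
--     return True
-- ===== Notes on version B (the rewrite author's own statement) =====
-- stated objective: simpler
-- what changed: Replaces the tail recursion on list slices (with a separate single-element base case) by one guard for the empty list plus a single iterative pass with early return.
import Mathlib
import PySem

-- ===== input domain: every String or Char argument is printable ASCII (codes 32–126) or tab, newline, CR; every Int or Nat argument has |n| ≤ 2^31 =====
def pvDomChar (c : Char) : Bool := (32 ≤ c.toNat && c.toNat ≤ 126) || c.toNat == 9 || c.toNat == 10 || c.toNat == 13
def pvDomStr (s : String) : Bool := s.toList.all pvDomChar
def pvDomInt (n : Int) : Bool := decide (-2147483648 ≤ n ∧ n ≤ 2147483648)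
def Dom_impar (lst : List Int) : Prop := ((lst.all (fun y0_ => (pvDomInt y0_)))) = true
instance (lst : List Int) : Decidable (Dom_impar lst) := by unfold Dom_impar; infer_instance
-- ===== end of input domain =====

-- B replaces A's tail recursion over list slices by an empty-list guard plus a single iterative pass with early return (simpler decomposition).


-- ===== PORT A =====
def impar (lst : List Int) : Bool :=
  match lst with
  | [] => false                                   -- if lst == []: return False
  | [x] =>                                        -- if len(lst) == 1:
      if PySem.Int.mod x 2 == 0 then false        --   if lst[0] % 2 == 0: return False
      else true                                   --   return True
  | x :: rest =>
      if PySem.Int.mod x 2 == 1 then impar rest   -- if lst[0] % 2 == 1: return impar(lst[1:])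
      else false                                  -- return False

-- ===== PORT B =====
-- the for-loop of Source B with its early return
def imparLoop (lst : List Int) : Bool :=
  match lst with
  | [] => true                                    -- loop finished: return True
  | x :: xs =>
      if PySem.Int.mod x 2 != 1 then false        -- if x % 2 != 1: return False
      else imparLoop xs

def impar_alt (lst : List Int) : Bool :=
  if lst == [] then false                         -- if not lst: return False
  else imparLoop lst

-- ===== PRECONDITION & SPEC =====
def Spec_impar (lst : List Int) (out : Bool) : Prop := out = impar_alt lst
instance (lst : List Int) (out : Bool) : Decidable (Spec_impar lst out) := by unfold Spec_impar; infer_instance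

-- ===== CLAIM (what is proved, stated in full; the proofs are below) =====
def Claim_equal_impar : Prop := ∀ (lst : List Int), Dom_impar lst → Spec_impar lst (impar lst)

-- ===== LEMMAS AND PROOFS =====
lemma mod2_cases (x : Int) : PySem.Int.mod x 2 = 0 ∨ PySem.Int.mod x 2 = 1 := by
  have h0 := PySem.Int.mod_nonneg x (b := 2) (by omega)
  have h1 := PySem.Int.mod_lt x (b := 2) (by omega)
  omega

lemma impar_eq_alt (lst : List Int) : impar lst = impar_alt lst := by
  induction lst with
  | nil => rfl
  | cons x xs ih =>
    cases xs with
    | nil =>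
      rcases mod2_cases x with h | h <;>
        simp only [impar, impar_alt, imparLoop, h] <;> simp
    | cons y ys =>
      rcases mod2_cases x with h | h
      · simp only [impar, impar_alt, imparLoop, h]; simp
      · simp only [impar, impar_alt, imparLoop, h, ih]
        simp [imparLoop]

-- ===== VERDICT (by name: the statement is the Claim_ definition above) =====
theorem impar_spec : Claim_equal_impar := by
  intro lst _
  unfold Spec_impar
  exact impar_eq_alt lst
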